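-- pv_equiv track=rewrite | github.com/raffaelecheula/wulffparticles | wulffparticles/sites_names.py | get_sites_distribution_types
-- ===== SOURCE A (Python) =====
-- def get_sites_distribution(
--     sites_hkl: list,
-- ) -> dict:
--     """Get the sites distribution."""
--     sites_distrib = {}
--     for hkl_list in sites_hkl:
--         sites_distrib[tuple(hkl_list)] = sites_distrib.get(tuple(hkl_list), 0) + 1
--     return sites_distrib
--
-- def reduce_sites_distribution(
--     sites_distrib: dict,
--     n_hkl_sites: int = 1,
-- ) -> dict:
--     """Reduce the sites distribution to only tuples with length n_hkl_sites."""
--     from itertools import combinations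
--     sites_distrib_red = {}
--     for hkl_tuple in sites_distrib:
--         if len(hkl_tuple) == n_hkl_sites:
--             sites_distrib_red[hkl_tuple] = (
--                 sites_distrib_red.get(hkl_tuple, 0) + sites_distrib[hkl_tuple]
--             )
--         elif len(hkl_tuple) > n_hkl_sites:
--             for hkl_red in combinations(hkl_tuple, n_hkl_sites):
--                 sites_distrib_red[hkl_red] = (
--                     sites_distrib_red.get(hkl_red, 0) + sites_distrib[hkl_tuple]
--                 )
--     return dict(sorted(sites_distrib_red.items()))
--
-- def get_sites_distribution_types(
--     sites_hkl: list,
--     sitetype_dict: dict = {"facets": 1, "edges": 2, "corners": 3},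
-- ):
--     """Get the sites distribution for each type of site."""
--     # Get sites distribution.
--     sites_distrib = get_sites_distribution(sites_hkl=sites_hkl)
--     # Reduce sites distribution.
--     sites_distrib_dict = {}
--     for key in sitetype_dict:
--         sites_distrib_dict[key] = reduce_sites_distribution(
--             sites_distrib=sites_distrib,
--             n_hkl_sites=sitetype_dict[key],
--         )
--     return sites_distrib_dict
-- ===== SOURCE B (Python) =====
-- from itertools import combinations, groupby
--
-- def get_sites_distribution_types(
--     sites_hkl: list,
--     sitetype_dict: dict = {"facets": 1, "edges": 2, "corners": 3},
-- ):
--     """Sort-then-group: gather every n-combination of every site tuple, sort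
--     them, and run-length-encode the sorted stream (no frequency dicts)."""
--     return {
--         key: {c: sum(1 for _ in grp) for c, grp in groupby(sorted(
--             comb
--             for hkl_list in sites_hkl
--             for comb in combinations(tuple(hkl_list), n)
--         ))}
--         for key, n in sitetype_dict.items()
--     }
-- ===== Notes on version B (the rewrite author's own statement) =====
-- stated objective: simpler
-- what changed: B replaces A's two dict-building passes (a tuple-frequency table, then a per-type reduce dict with separate len==n / len>n branches, finally dict(sorted(...))) by a dict-free sort-then-group pipeline: per site type it collects every n-combination of every site tuple, sorts that stream, and run-length-encodes it with groupby.
import Mathlib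
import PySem

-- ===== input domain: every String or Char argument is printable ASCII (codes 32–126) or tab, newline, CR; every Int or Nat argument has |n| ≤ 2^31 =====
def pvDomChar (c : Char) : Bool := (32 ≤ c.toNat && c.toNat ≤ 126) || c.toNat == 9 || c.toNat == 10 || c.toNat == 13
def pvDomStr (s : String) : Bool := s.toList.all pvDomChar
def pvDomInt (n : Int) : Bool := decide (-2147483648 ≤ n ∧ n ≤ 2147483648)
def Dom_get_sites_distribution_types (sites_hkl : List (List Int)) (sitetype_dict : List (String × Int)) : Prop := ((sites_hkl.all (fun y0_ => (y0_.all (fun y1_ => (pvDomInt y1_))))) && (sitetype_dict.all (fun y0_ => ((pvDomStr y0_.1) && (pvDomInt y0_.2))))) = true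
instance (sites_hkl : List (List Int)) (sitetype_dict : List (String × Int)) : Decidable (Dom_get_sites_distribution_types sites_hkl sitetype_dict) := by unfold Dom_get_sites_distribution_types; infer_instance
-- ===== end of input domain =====

-- B replaces A's two dict-building passes (frequency table, then per-type reduce dict, then
-- dict(sorted(...))) by a dict-free sort-then-group pipeline per site type; objective: simpler.


-- ===== PORT A =====
-- helper get_sites_distribution: counts each tuple's occurrences
def pvA_get_sites_distribution (sites_hkl : List (List Int)) : PySem.Dict (List Int) Int :=
  sites_hkl.foldl (fun d t => d.insert t (d.getD t 0 + 1)) PySem.Dict.empty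

-- helper reduce_sites_distribution: two branches (length == n, length > n), then dict(sorted(...))
def pvA_reduce_sites_distribution (sites_distrib : PySem.Dict (List Int) Int) (n_hkl_sites : Int) :
    List (List Int × Int) :=
  let red := sites_distrib.items.foldl (fun (r : PySem.Dict (List Int) Int) p =>
    if (p.1.length : Int) = n_hkl_sites then
      r.insert p.1 (r.getD p.1 0 + p.2)
    else if n_hkl_sites < (p.1.length : Int) then
      -- combinations(hkl_tuple, n_hkl_sites); Pre_ excludes negative n (Python raises ValueError)
      (PySem.List.combinations p.1 n_hkl_sites.toNat).foldl
        (fun r c => r.insert c (r.getD c 0 + p.2)) r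
    else r) PySem.Dict.empty
  -- sorted(items): keys are distinct, pair comparison is lexicographic
  PySem.List.sorted2 red.items (fun p => p.1) (fun p => p.2) false

def get_sites_distribution_types (sites_hkl : List (List Int)) (sitetype_dict : List (String × Int)) : List (String × List (List Int × Int)) :=
  let sites_distrib := pvA_get_sites_distribution sites_hkl
  ((PySem.Dict.ofList sitetype_dict).items.foldl
    (fun (out : PySem.Dict String (List (List Int × Int))) kv =>
      out.insert kv.1 (pvA_reduce_sites_distribution sites_distrib kv.2))
    PySem.Dict.empty).items

-- ===== PORT B =====
-- itertools.groupby on the sorted key stream + sum(1 for _ in grp): run-length encoding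
def pvB_group : List (List Int) → List (List Int × Int)
  | [] => []
  | x :: xs =>
    (x, ((xs.takeWhile (fun y => y == x)).length : Int) + 1) ::
      pvB_group (xs.dropWhile (fun y => y == x))
  termination_by l => l.length
  decreasing_by simpa using Nat.lt_succ_of_le (List.length_dropWhile_le _ _)

-- dict comprehension over the site types: every n-combination of every tuple, sorted, grouped
def get_sites_distribution_types_alt (sites_hkl : List (List Int)) (sitetype_dict : List (String × Int)) : List (String × List (List Int × Int)) :=
  (PySem.Dict.ofList sitetype_dict).items.map (fun kv =>
    (kv.1, pvB_group (PySem.List.sorted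
      (sites_hkl.flatMap (fun hkl_list => PySem.List.combinations hkl_list kv.2.toNat))
      (fun comb => comb) false)))

-- ===== PRECONDITION & SPEC =====
-- Pre_ excludes exactly the inputs where Python A raises (itertools.combinations raises
-- ValueError for a negative count, reached whenever some site type has a negative count and
-- sites_hkl is nonempty); B raises there too.
def Pre_get_sites_distribution_types (sites_hkl : List (List Int)) (sitetype_dict : List (String × Int)) : Prop :=
  sites_hkl = [] ∨ (PySem.Dict.ofList sitetype_dict).values.all (fun v => 0 ≤ v) = true
instance (sites_hkl : List (List Int)) (sitetype_dict : List (String × Int)) : Decidable (Pre_get_sites_distribution_types sites_hkl sitetype_dict) := by unfold Pre_get_sites_distribution_types; infer_instance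

def pvWitness_get_sites_distribution_types : List (List Int) × (List (String × Int)) :=
  ([[1, 2], [1], [1, 2]], [("facets", 1), ("edges", 2)])

def Spec_get_sites_distribution_types (sites_hkl : List (List Int)) (sitetype_dict : List (String × Int)) (out : List (String × List (List Int × Int))) : Prop := out = get_sites_distribution_types_alt sites_hkl sitetype_dict
instance (sites_hkl : List (List Int)) (sitetype_dict : List (String × Int)) (out : List (String × List (List Int × Int))) : Decidable (Spec_get_sites_distribution_types sites_hkl sitetype_dict out) := by unfold Spec_get_sites_distribution_types; infer_instance

-- ===== CLAIM (what is proved, stated in full; the proofs are below) =====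
def Claim_equal_get_sites_distribution_types : Prop := ∀ (sites_hkl : List (List Int)) (sitetype_dict : List (String × Int)), Dom_get_sites_distribution_types sites_hkl sitetype_dict → Pre_get_sites_distribution_types sites_hkl sitetype_dict → Spec_get_sites_distribution_types sites_hkl sitetype_dict (get_sites_distribution_types sites_hkl sitetype_dict)

-- ===== LEMMAS AND PROOFS =====

-- both per-type results are characterized by the same predicate over the combination stream
-- l: strictly key-increasing, keys = distinct elements of l, value = multiplicity in l.
def pvRLE (l : List (List Int)) (o : List (List Int × Int)) : Prop :=
  o.Pairwise (fun a b => a.1 < b.1) ∧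
  (∀ c, c ∈ o.map Prod.fst ↔ c ∈ l) ∧
  (∀ p ∈ o, p.2 = (l.count p.1 : Int))

theorem pvRLE_uniq (l : List (List Int)) (o1 o2 : List (List Int × Int))
    (h1 : pvRLE l o1) (h2 : pvRLE l o2) : o1 = o2 := by
  obtain ⟨hp1, hm1, hv1⟩ := h1
  obtain ⟨hp2, hm2, hv2⟩ := h2
  have hkeys : o1.map Prod.fst = o2.map Prod.fst := by
    have hs1 : (o1.map Prod.fst).Pairwise (· < ·) := List.pairwise_map.mpr hp1
    have hs2 : (o2.map Prod.fst).Pairwise (· < ·) := List.pairwise_map.mpr hp2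
    have hn1 : (o1.map Prod.fst).Nodup := hs1.imp ne_of_lt
    have hn2 : (o2.map Prod.fst).Nodup := hs2.imp ne_of_lt
    exact List.Perm.eq_of_pairwise
      (fun a b _ _ hab hba => absurd hba (not_lt.mpr hab.le)) hs1 hs2
      ((List.perm_ext_iff_of_nodup hn1 hn2).mpr (fun c => (hm1 c).trans (hm2 c).symm))
  have hre : ∀ o : List (List Int × Int), (∀ p ∈ o, p.2 = (l.count p.1 : Int)) →
      o = (o.map Prod.fst).map (fun c => (c, (l.count c : Int))) := by
    intro o hv
    rw [List.map_map]
    have heq : o.map ((fun c => (c, (l.count c : Int))) ∘ Prod.fst) = o.map id :=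
      List.map_congr_left (fun p hp => by
        obtain ⟨a, b⟩ := p
        have hb : b = (l.count a : Int) := hv (a, b) hp
        simp only [Function.comp_apply, id_eq]
        rw [hb])
    rw [heq]
    exact (List.map_id o).symm
  rw [hre o1 hv1, hre o2 hv2, hkeys]

-- multiplicity of a key in a flatMap stream
theorem pv_count_flatMap (l : List (List Int)) (g : List Int → List (List Int)) (c : List Int) :
    ((l.flatMap g).count c : Int) = (l.map (fun t => ((g t).count c : Int))).sum := by
  induction l with
  | nil => simp
  | cons x t ih => simp [List.flatMap_cons, List.count_append, ih]

-- the head of dropWhile does not satisfy the predicate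
theorem pv_dropWhile_head_false (p : List Int → Bool) (xs : List (List Int))
    (y : List Int) (t : List (List Int)) (h : xs.dropWhile p = y :: t) : p y = false := by
  induction xs with
  | nil => simp at h
  | cons a l ih =>
    by_cases hp : p a = true
    · rw [List.dropWhile_cons, if_pos hp] at h; exact ih h
    · rw [List.dropWhile_cons, if_neg hp] at h
      simp only [List.cons.injEq] at h
      rcases h with ⟨rfl, rfl⟩
      simpa using hp

-- B's run-length grouping of a sorted stream satisfies the characterization
theorem pvB_group_rle (l : List (List Int)) (h : l.Pairwise (· ≤ ·)) : pvRLE l (pvB_group l) := by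
  induction l using pvB_group.induct with
  | case1 => exact ⟨by simp [pvB_group], by simp [pvB_group], by simp [pvB_group]⟩
  | case2 x xs ih =>
    have hpc := List.pairwise_cons.mp h
    have hx_le : ∀ z ∈ xs, x ≤ z := hpc.1
    set r := xs.takeWhile (fun y => y == x) with hr
    set rest := xs.dropWhile (fun y => y == x) with hrest
    have hxr : ∀ z ∈ r, z = x := fun z hz => by
      simpa using List.mem_takeWhile_imp hz
    have hsplit : r ++ rest = xs := List.takeWhile_append_dropWhile
    have hrest_pw : rest.Pairwise (· ≤ ·) := hpc.2.sublist (List.dropWhile_sublist _)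
    have hrest_gt : ∀ z ∈ rest, x < z := by
      intro z hz
      cases hcons : rest with
      | nil => simp [hcons] at hz
      | cons y t =>
        have hy : ¬ y = x := by
          simpa using pv_dropWhile_head_false _ xs y t hcons
        have hy_mem : y ∈ xs := by rw [← hsplit, hcons]; simp
        have hxy : x < y := lt_of_le_of_ne (hx_le y hy_mem) (Ne.symm hy)
        rw [hcons] at hz
        rcases List.mem_cons.mp hz with rfl | hz'
        · exact hxy
        · exact lt_of_lt_of_le hxy
            (List.rel_of_pairwise_cons (hcons ▸ hrest_pw) hz')
    obtain ⟨ihp, ihm, ihv⟩ := ih hrest_pw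
    have hgt_fst : ∀ p ∈ pvB_group rest, x < p.1 := fun p hp =>
      hrest_gt p.1 ((ihm p.1).mp (List.mem_map_of_mem hp))
    refine ⟨?_, ?_, ?_⟩
    · rw [pvB_group, ← hr, ← hrest]
      exact List.pairwise_cons.mpr ⟨hgt_fst, ihp⟩
    · intro c
      rw [pvB_group, ← hr, ← hrest]
      simp only [List.map_cons, List.mem_cons]
      rw [ihm c]
      constructor
      · rintro (rfl | hc)
        · exact Or.inl rfl
        · have hcx : c ∈ xs := by rw [← hsplit]; exact List.mem_append_right _ hc
          exact Or.inr hcx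
      · rintro (rfl | hc')
        · exact Or.inl rfl
        · have hc'' : c ∈ r ++ rest := by rw [hsplit]; exact hc'
          rcases List.mem_append.mp hc'' with hcr | hcrest
          · exact Or.inl (hxr c hcr)
          · exact Or.inr hcrest
    · intro p hp
      rw [pvB_group, ← hr, ← hrest] at hp
      rcases List.mem_cons.mp hp with rfl | hp'
      · have hcr : r.count x = r.length := List.count_eq_length.mpr (fun b hb => by
          simp [hxr b hb])
        have hcrest : rest.count x = 0 :=
          List.count_eq_zero.mpr (fun hx => lt_irrefl x (hrest_gt x hx))
        simp only [List.count_cons_self]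
        rw [← hsplit, List.count_append, hcr, hcrest]
        push_cast; ring
      · have hne : p.1 ≠ x := ne_of_gt (hgt_fst p hp')
        have hcr : r.count p.1 = 0 := List.count_eq_zero.mpr (fun hc => hne (hxr p.1 hc))
        rw [ihv p hp', List.count_cons_of_ne (Ne.symm hne), ← hsplit, List.count_append, hcr]
        simp

-- the port's inferred comparison instances on List Int agree with the LinearOrder ones
theorem pv_sorted_inst (xs : List (List Int)) :
    PySem.List.sorted xs (fun c => c) false
      = @PySem.List.sorted (List Int) (List Int) List.instLinearOrder.toLT
          LinearOrder.toDecidableLT xs (fun c => c) false := by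
  congr 1

-- weighted-increment fold over an increment list (A's reduce loop shape)
def pvW (d : PySem.Dict (List Int) Int) (l : List (List Int × Int)) : PySem.Dict (List Int) Int :=
  l.foldl (fun d p => d.insert p.1 (d.getD p.1 0 + p.2)) d

-- total weight an increment list adds at key c
def pvS (l : List (List Int × Int)) (c : List Int) : Int :=
  ((l.filter (fun p => p.1 == c)).map (fun p => p.2)).sum

theorem pvW_getD (l : List (List Int × Int)) (d : PySem.Dict (List Int) Int) (c : List Int) :
    (pvW d l).getD c 0 = d.getD c 0 + pvS l c := by
  induction l generalizing d with
  | nil => simp [pvW, pvS]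
  | cons p t ih =>
    simp only [pvW, List.foldl_cons] at *
    rw [ih]
    by_cases h : c = p.1
    · subst h
      simp [pvS, PySem.Dict.getD_insert_self, add_assoc]
    · simp [pvS, PySem.Dict.getD_insert, h, Ne.symm h]

theorem pvW_keys (l : List (List Int × Int)) (d : PySem.Dict (List Int) Int) :
    (pvW d l).keys = PySem.Set.update d.keys (l.map (fun p => p.1)) := by
  simpa [pvW] using PySem.Dict.keys_foldl_insert_key l (fun p => p.1)
    (fun d p => d.getD p.1 0 + p.2) d

theorem pvW_flatMap {α : Type} (g : α → List (List Int × Int)) (l : List α)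
    (d : PySem.Dict (List Int) Int) :
    l.foldl (fun d x => pvW d (g x)) d = pvW d (l.flatMap g) := by
  induction l generalizing d with
  | nil => simp [pvW]
  | cons x t ih => simp only [List.flatMap_cons, List.foldl_cons, pvW, List.foldl_append] at *; simp [ih]

theorem pvS_flatMap {α : Type} (g : α → List (List Int × Int)) (l : List α) (c : List Int) :
    pvS (l.flatMap g) c = (l.map (fun x => pvS (g x) c)).sum := by
  induction l with
  | nil => simp [pvS]
  | cons x t ih => simp [pvS, List.flatMap_cons, List.filter_append] at *; omega

theorem pvS_map_pair (xs : List (List Int)) (w : Int) (c : List Int) :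
    pvS (xs.map (fun x => (x, w))) c = w * xs.count c := by
  simp [pvS, List.filter_map, Function.comp_def, List.map_const',
    List.sum_replicate, List.count_eq_countP, List.countP_eq_length_filter, mul_comm]

-- sum of a map over a Nodup list equals the Finset sum over its elements
theorem pv_sum_map_toFinset {α : Type} [DecidableEq α] {s : List α}
    (h : s.Nodup) (g : α → Int) : ∑ k ∈ s.toFinset, g k = (s.map g).sum := by
  induction s with
  | nil => simp
  | cons x t ih =>
    simp only [List.toFinset_cons, List.map_cons, List.sum_cons]
    rw [Finset.sum_insert (by simpa using (List.nodup_cons.mp h).1),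
      ih (List.nodup_cons.mp h).2]

theorem pv_count_inst (k : List Int) (l : List (List Int)) :
    @List.count (List Int) instBEqOfDecidableEq k l = l.count k := by
  induction l with
  | nil => rfl
  | cons x t ih => simp [List.count_cons, ih]

-- grouping: summing f over a list equals summing count·f over its distinct elements
theorem pv_group_sum (l : List (List Int)) (f : List Int → Int) :
    ((PySem.Set.ofList l).map (fun k => (l.count k : Int) * f k)).sum = (l.map f).sum := by
  have hnd : (PySem.Set.ofList l).Nodup := PySem.Set.nodup_ofList l
  have hfin : (PySem.Set.ofList l).toFinset = l.toFinset := by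
    ext x; simp [List.mem_toFinset, PySem.Set.mem_ofList]
  calc ((PySem.Set.ofList l).map (fun k => (l.count k : Int) * f k)).sum
      = ∑ k ∈ (PySem.Set.ofList l).toFinset, (l.count k : Int) * f k := by
        rw [pv_sum_map_toFinset hnd]
    _ = ∑ k ∈ l.toFinset, @List.count (List Int) instBEqOfDecidableEq k l • f k := by
        rw [hfin]; apply Finset.sum_congr rfl; intro k _
        rw [pv_count_inst]; simp
    _ = (l.map f).sum := (Finset.sum_list_map_count l f).symm

-- the increment list of A's reduce step for one frequency-table item
def pvGA (n : Int) (p : List Int × Int) : List (List Int × Int) :=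
  if (p.1.length : Int) = n then [(p.1, p.2)]
  else if n < (p.1.length : Int) then (PySem.List.combinations p.1 n.toNat).map (fun c => (c, p.2))
  else []

theorem pvGA_eq (n : Int) (hn : 0 ≤ n) (p : List Int × Int) :
    pvGA n p = (PySem.List.combinations p.1 n.toNat).map (fun c => (c, p.2)) := by
  unfold pvGA
  by_cases h1 : (p.1.length : Int) = n
  · have : n.toNat = p.1.length := by omega
    simp [h1, this, PySem.List.combinations_length_self]
  · by_cases h2 : n < (p.1.length : Int)
    · simp [h1, h2]
    · have : p.1.length < n.toNat := by omega
      simp [h1, h2, PySem.List.combinations_eq_nil_of_length_lt _ this]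

-- A's reduce dict is the weighted fold of the flatMap of pvGA over the frequency table
theorem pvA_dict_eq (sd : PySem.Dict (List Int) Int) (n : Int) :
    sd.items.foldl (fun (r : PySem.Dict (List Int) Int) p =>
      if (p.1.length : Int) = n then r.insert p.1 (r.getD p.1 0 + p.2)
      else if n < (p.1.length : Int) then
        (PySem.List.combinations p.1 n.toNat).foldl (fun r c => r.insert c (r.getD c 0 + p.2)) r
      else r) PySem.Dict.empty
    = pvW PySem.Dict.empty (sd.items.flatMap (pvGA n)) := by
  rw [← pvW_flatMap]
  apply PySem.List.foldl_congr_mem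
  intro r p _
  unfold pvGA
  split_ifs with h1 h2
  · simp [pvW]
  · simp [pvW, List.foldl_map]
  · simp [pvW]

-- congruence of insertBy under a comparator agreeing on the inserted elements
theorem pv_insertBy_congr {α : Type} (f g : α → α → Bool) (x : α) (ys : List α)
    (h : ∀ b ∈ ys, f x b = g x b) :
    PySem.List.insertBy f x ys = PySem.List.insertBy g x ys := by
  induction ys with
  | nil => rfl
  | cons y t ih =>
    simp only [PySem.List.insertBy, h y (by simp)]
    split_ifs with hb
    · rfl
    · simp only [List.cons.injEq, true_and]
      exact ih (fun b hb => h b (by simp [hb]))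

theorem pv_foldl_insertBy_congr_aux {α : Type} (f g : α → α → Bool) (l acc : List α)
    (h : ∀ a ∈ l, ∀ b, (b ∈ l ∨ b ∈ acc) → f a b = g a b) :
    l.foldl (fun acc y => PySem.List.insertBy f y acc) acc
      = l.foldl (fun acc y => PySem.List.insertBy g y acc) acc := by
  induction l generalizing acc with
  | nil => rfl
  | cons y t ih =>
    simp only [List.foldl_cons]
    rw [pv_insertBy_congr f g y acc (fun b hb => h y (by simp) b (Or.inr hb))]
    apply ih
    intro a ha b hb
    rcases hb with hb | hb
    · exact h a (by simp [ha]) b (Or.inl (by simp [hb]))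
    · rcases (PySem.List.mem_insertBy _ _ _ _).mp hb with h' | h'
      · exact h a (by simp [ha]) b (Or.inl (by simp [h']))
      · exact h a (by simp [ha]) b (Or.inr h')

theorem pv_foldl_insertBy_congr {α : Type} (f g : α → α → Bool) (l : List α)
    (h : ∀ a ∈ l, ∀ b ∈ l, f a b = g a b) :
    l.foldl (fun acc y => PySem.List.insertBy f y acc) []
      = l.foldl (fun acc y => PySem.List.insertBy g y acc) [] := by
  apply pv_foldl_insertBy_congr_aux
  intro a ha b hb
  rcases hb with hb | hb
  · exact h a ha b hb
  · simp at hb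

-- on a list with distinct first components, Python's pair sort is the sort by first component
theorem pv_sorted2_eq_sorted_fst (l : List (List Int × Int))
    (hnd : (l.map (fun p => p.1)).Nodup) :
    PySem.List.sorted2 l (fun p => p.1) (fun p => p.2) false
      = @PySem.List.sorted (List Int × Int) (List Int) List.instLinearOrder.toLT
          LinearOrder.toDecidableLT l (fun p => p.1) false := by
  unfold PySem.List.sorted2 PySem.List.sorted
  simp only [if_neg (by simp : ¬ (false = true))]
  apply pv_foldl_insertBy_congr
  intro a ha b hb
  by_cases hab : a = b
  · subst hab
    simp
  · have hne : a.1 ≠ b.1 := fun hfst =>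
      hab (List.inj_on_of_nodup_map hnd ha hb hfst)
    rcases lt_or_gt_of_ne hne with h | h
    · simp [h]
    · simp [h, not_lt.mpr (le_of_lt h)]

-- A's per-type result satisfies the characterization over the combination stream
theorem pvA_rle (sites : List (List Int)) (n : Int) (hn : 0 ≤ n) :
    pvRLE (sites.flatMap (fun t => PySem.List.combinations t n.toNat))
      (pvA_reduce_sites_distribution (pvA_get_sites_distribution sites) n) := by
  have hA : pvA_get_sites_distribution sites = PySem.Dict.counter sites :=
    PySem.Dict.foldl_insert_getD_add_one_eq_counter sites
  unfold pvA_reduce_sites_distribution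
  rw [pvA_dict_eq]
  set L := sites.flatMap (fun t => PySem.List.combinations t n.toNat) with hL
  set LA := (pvA_get_sites_distribution sites).items.flatMap (pvGA n) with hLA
  set D := pvW PySem.Dict.empty LA with hD
  -- keys of D are distinct
  have hknd : D.keys.Nodup := by
    rw [hD, pvW_keys]
    simp [PySem.Set.update_nil_left, PySem.Set.nodup_ofList]
  have hind : (D.items.map (fun p => p.1)).Nodup := hknd
  -- D's value at any key is the multiplicity in L
  have hval : ∀ c, D.getD c 0 = (L.count c : Int) := by
    intro c
    rw [hD, pvW_getD, PySem.Dict.getD_empty, zero_add, hLA, pvS_flatMap, hA,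
      PySem.Dict.items_counter, List.map_map, hL, pv_count_flatMap]
    calc ((PySem.Set.ofList sites).map
            ((fun x => pvS (pvGA n x) c) ∘ fun k => (k, (sites.count k : Int)))).sum
        = ((PySem.Set.ofList sites).map
            (fun k => (sites.count k : Int) * ((PySem.List.combinations k n.toNat).count c : Int))).sum := by
          apply congrArg
          apply List.map_congr_left
          intro k _
          simp [Function.comp, pvGA_eq n hn, pvS_map_pair]
      _ = (sites.map (fun t => ((PySem.List.combinations t n.toNat).count c : Int))).sum :=
          pv_group_sum sites _
  -- D's key set is the set of elements of L
  have hmem : ∀ c, c ∈ D.keys ↔ c ∈ L := by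
    intro c
    rw [hD, pvW_keys]
    simp only [PySem.Dict.keys_empty, PySem.Set.update_nil_left, PySem.Set.mem_ofList]
    rw [hLA, hA, PySem.Dict.items_counter, hL]
    simp only [List.mem_map, List.mem_flatMap, PySem.Set.mem_ofList]
    constructor
    · rintro ⟨p, ⟨q, ⟨k, hk, rfl⟩, hq⟩, rfl⟩
      rw [pvGA_eq n hn] at hq
      simp only [List.mem_map] at hq
      obtain ⟨cc, hcc, rfl⟩ := hq
      exact ⟨k, hk, hcc⟩
    · rintro ⟨t, ht, hc⟩
      exact ⟨(c, (sites.count t : Int)), ⟨(t, (sites.count t : Int)), ⟨t, ht, rfl⟩, by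
        rw [pvGA_eq n hn]; exact List.mem_map_of_mem hc⟩, rfl⟩
  rw [pv_sorted2_eq_sorted_fst _ hind]
  set out := @PySem.List.sorted (List Int × Int) (List Int) List.instLinearOrder.toLT
    LinearOrder.toDecidableLT D.items (fun p => p.1) false with hout
  have hperm : out.Perm D.items := @PySem.List.sorted_perm (List Int × Int) (List Int)
    List.instLinearOrder.toLT LinearOrder.toDecidableLT D.items (fun p => p.1) false
  refine ⟨?_, ?_, ?_⟩
  · -- strictly increasing keys
    have hle := PySem.List.sorted_pairwise D.items (fun p : List Int × Int => p.1)
    have hondup : (out.map (fun p => p.1)).Nodup := ((hperm.map _).nodup_iff).mpr hind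
    have hne : out.Pairwise (fun a b : List Int × Int => a.1 ≠ b.1) := by
      simpa [List.Nodup, List.pairwise_map] using hondup
    exact (hle.and hne).imp (fun h => lt_of_le_of_ne h.1 h.2)
  · intro c
    have : c ∈ out.map Prod.fst ↔ c ∈ D.items.map Prod.fst := (hperm.map Prod.fst).mem_iff
    rw [this]
    exact hmem c
  · intro p hp
    obtain ⟨a, b⟩ := p
    have hpD : (a, b) ∈ D.items := hperm.mem_iff.mp hp
    have hg := PySem.Dict.getD_of_mem_items D hpD hknd 0
    show b = _
    rw [← hg, hval a]

-- B's per-type result satisfies the same characterization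
theorem pvB_rle (sites : List (List Int)) (n : Int) :
    pvRLE (sites.flatMap (fun t => PySem.List.combinations t n.toNat))
      (pvB_group (PySem.List.sorted
        (sites.flatMap (fun t => PySem.List.combinations t n.toNat)) (fun comb => comb) false)) := by
  set L := sites.flatMap (fun t => PySem.List.combinations t n.toNat) with hL
  rw [pv_sorted_inst]
  set SL := @PySem.List.sorted (List Int) (List Int) List.instLinearOrder.toLT
    LinearOrder.toDecidableLT L (fun c => c) false with hSL
  have hperm : SL.Perm L := @PySem.List.sorted_perm (List Int) (List Int)
    List.instLinearOrder.toLT LinearOrder.toDecidableLT L (fun c => c) false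
  have hpw : SL.Pairwise (· ≤ ·) := by
    simpa using PySem.List.sorted_pairwise L (fun c : List Int => c)
  obtain ⟨h1, h2, h3⟩ := pvB_group_rle SL hpw
  refine ⟨h1, fun c => (h2 c).trans hperm.mem_iff, fun p hp => ?_⟩
  rw [h3 p hp, hperm.count_eq]

theorem pv_reduce_eq (sites : List (List Int)) (n : Int) (h : 0 ≤ n ∨ sites = []) :
    pvA_reduce_sites_distribution (pvA_get_sites_distribution sites) n
      = pvB_group (PySem.List.sorted
          (sites.flatMap (fun t => PySem.List.combinations t n.toNat)) (fun comb => comb) false) := by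
  rcases h with hn | hnil
  · exact pvRLE_uniq _ _ _ (pvA_rle sites n hn) (pvB_rle sites n)
  · subst hnil
    show ([] : List (List Int × Int)) = pvB_group []
    simp [pvB_group]

-- ===== VERDICT (by name: the statement is the Claim_ definition above) =====
theorem get_sites_distribution_types_spec : Claim_equal_get_sites_distribution_types := by
  intro sites_hkl sitetype_dict _ hpre
  unfold Spec_get_sites_distribution_types
  show get_sites_distribution_types sites_hkl sitetype_dict
      = get_sites_distribution_types_alt sites_hkl sitetype_dict
  unfold get_sites_distribution_types get_sites_distribution_types_alt
  dsimp only
  rw [PySem.Dict.items_foldl_insert_fresh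
    ((PySem.Dict.ofList sitetype_dict).items)
    (fun kv => kv.1)
    (fun kv => pvA_reduce_sites_distribution (pvA_get_sites_distribution sites_hkl) kv.2)
    PySem.Dict.empty
    (fun a _ => PySem.Dict.contains_empty a.1)
    (PySem.Dict.nodup_keys_ofList sitetype_dict)]
  rw [show (PySem.Dict.empty : PySem.Dict String (List (List Int × Int))).items = [] from rfl, List.nil_append]
  apply List.map_congr_left
  intro kv hkv
  rw [pv_reduce_eq]
  rcases hpre with h | h
  · right; exact h
  · left
    have hv : kv.2 ∈ (PySem.Dict.ofList sitetype_dict).values := by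
      simp only [PySem.Dict.values]
      exact List.mem_map_of_mem hkv
    have := List.all_eq_true.mp h _ hv
    simpa using this
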